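-- pv_equiv track=rewrite | github.com/MDoerner/AdventOfCode2019 | AdventOfCodeIn2019InPython/AdventOfCode20191203_2.py | absolute_sections
-- ===== SOURCE A (Python) =====
-- def absolute_sections(start_point, rel_sections):
--     sections = []
--     section_start = start_point
--     for section in rel_sections:
--         section_end = end_point(section_start, section)
--         sections.append((section_start, section_end))
--         section_start = section_end
--     return sections
--
-- def end_point(start_point, relative_section):
--     (x, y) = start_point
--     (direction, distance) = relative_section
--     if direction == 'L':
--         return (x - distance, y)
--     elif direction == 'R':
--         return (x + distance, y)
--     elif direction == 'U':
--         return (x, y + distance)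
--     elif direction == 'D':
--         return (x, y - distance)
--     raise ValueError("Not supported direction", direction)
-- ===== SOURCE B (Python) =====
-- _DIR = {'L': (-1, 0), 'R': (1, 0), 'U': (0, 1), 'D': (0, -1)}
--
-- def absolute_sections(start_point, rel_sections):
--     # pass 1: signed per-axis displacement of each move, via a unit-vector table
--     steps = [(_DIR[d][0] * n, _DIR[d][1] * n) for d, n in rel_sections]
--     # pass 2: prefix-sum each axis independently into absolute coordinate lists
--     xs = [start_point[0]]
--     ys = [start_point[1]]
--     for dx, dy in steps:
--         xs.append(xs[-1] + dx)
--         ys.append(ys[-1] + dy)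
--     # pass 3: pair consecutive absolute points by index
--     return [((xs[i], ys[i]), (xs[i + 1], ys[i + 1])) for i in range(len(steps))]
-- ===== Notes on version B (the rewrite author's own statement) =====
-- stated objective: alternative
-- what changed: B replaces A's single loop threading a current point through end_point by three staged passes: translate each move to a signed per-axis displacement via a unit-vector table, prefix-sum the x and y axes into separate coordinate lists, and assemble the segments by index; the end_point branch chain disappears entirely.
import Mathlib
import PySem

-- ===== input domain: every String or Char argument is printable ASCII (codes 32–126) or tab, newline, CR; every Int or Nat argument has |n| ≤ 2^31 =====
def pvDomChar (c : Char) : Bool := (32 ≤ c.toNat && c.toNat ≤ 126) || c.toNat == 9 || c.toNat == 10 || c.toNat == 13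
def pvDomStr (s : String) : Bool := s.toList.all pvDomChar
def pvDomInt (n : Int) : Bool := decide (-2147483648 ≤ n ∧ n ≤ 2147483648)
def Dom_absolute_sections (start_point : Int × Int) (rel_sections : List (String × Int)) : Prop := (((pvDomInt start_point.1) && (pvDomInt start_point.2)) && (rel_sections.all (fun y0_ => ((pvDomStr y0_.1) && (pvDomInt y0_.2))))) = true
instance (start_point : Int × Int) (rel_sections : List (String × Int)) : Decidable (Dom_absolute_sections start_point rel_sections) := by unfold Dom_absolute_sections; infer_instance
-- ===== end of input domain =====

-- B replaces A's loop threading a point through end_point by three staged passes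
-- (unit-vector table, per-axis prefix sums, index pairing); objective: alternative decomposition.
-- ===== PORT A =====
-- end_point: the raising branch is modelled as none (ValueError); Pre_ excludes it.
def endPoint? (start_point : Int × Int) (relative_section : String × Int) : Option (Int × Int) :=
  let x := start_point.1
  let y := start_point.2
  let direction := relative_section.1
  let distance := relative_section.2
  if direction = "L" then some (x - distance, y)
  else if direction = "R" then some (x + distance, y)
  else if direction = "U" then some (x, y + distance)
  else if direction = "D" then some (x, y - distance)
  else none

-- A's loop as structural recursion over rel_sections, threading section_start;
-- on a bad direction (outside Pre_) it stops, where Python raises.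
def absolute_sections (start_point : Int × Int) (rel_sections : List (String × Int)) : List ((Int × Int) × (Int × Int)) :=
  match rel_sections with
  | [] => []
  | sec :: rest =>
    match endPoint? start_point sec with
    | none => []
    | some section_end => (start_point, section_end) :: absolute_sections section_end rest

-- ===== PORT B =====
-- B's unit-vector table _DIR; lookup is none on a bad key (KeyError, outside Pre_).
def pvDirTable : PySem.Dict String (Int × Int) :=
  PySem.Dict.ofList [("L", (-1, 0)), ("R", (1, 0)), ("U", (0, 1)), ("D", (0, -1))]

-- B's pass 1: steps comprehension; a bad key makes the whole pass raise, modelled by mapM = none.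
def pvSteps? (rel_sections : List (String × Int)) : Option (List (Int × Int)) :=
  rel_sections.mapM (fun s => (pvDirTable.get? s.1).map (fun u => (u.1 * s.2, u.2 * s.2)))

-- B's pass 2 (one axis): xs = [a]; for d in ds: xs.append(xs[-1] + d)
def pvPrefix (a : Int) (ds : List Int) : List Int :=
  match ds with
  | [] => [a]
  | d :: rest => a :: pvPrefix (a + d) rest

def absolute_sections_alt (start_point : Int × Int) (rel_sections : List (String × Int)) : List ((Int × Int) × (Int × Int)) :=
  match pvSteps? rel_sections with
  | none => []  -- Python B raises KeyError here; outside Pre_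
  | some steps =>
    let xs := pvPrefix start_point.1 (steps.map (·.1))
    let ys := pvPrefix start_point.2 (steps.map (·.2))
    (List.range steps.length).map (fun i =>
      ((xs.getD i 0, ys.getD i 0), (xs.getD (i + 1) 0, ys.getD (i + 1) 0)))

-- ===== PRECONDITION & SPEC =====
-- Pre_ excludes inputs with a direction outside {L,R,U,D}, on which Python A raises ValueError (B raises KeyError).
def Pre_absolute_sections (start_point : Int × Int) (rel_sections : List (String × Int)) : Prop :=
  ∀ s ∈ rel_sections, s.1 = "L" ∨ s.1 = "R" ∨ s.1 = "U" ∨ s.1 = "D"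
instance (start_point : Int × Int) (rel_sections : List (String × Int)) : Decidable (Pre_absolute_sections start_point rel_sections) := by unfold Pre_absolute_sections; infer_instance
def pvWitness_absolute_sections : (Int × Int) × (List (String × Int)) := ((0, 0), [("R", 2), ("U", 3)])
def Spec_absolute_sections (start_point : Int × Int) (rel_sections : List (String × Int)) (out : List ((Int × Int) × (Int × Int))) : Prop := out = absolute_sections_alt start_point rel_sections
instance (start_point : Int × Int) (rel_sections : List (String × Int)) (out : List ((Int × Int) × (Int × Int))) : Decidable (Spec_absolute_sections start_point rel_sections out) := by unfold Spec_absolute_sections; infer_instance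

-- ===== CLAIM =====
def Claim_equal_absolute_sections : Prop := ∀ (start_point : Int × Int) (rel_sections : List (String × Int)), Dom_absolute_sections start_point rel_sections → Pre_absolute_sections start_point rel_sections → Spec_absolute_sections start_point rel_sections (absolute_sections start_point rel_sections)

-- ===== LEMMAS AND PROOFS =====
-- Under Pre_, every direction lookup in B's pass 1 succeeds.
theorem pre_steps (rest : List (String × Int))
    (h : ∀ s ∈ rest, s.1 = "L" ∨ s.1 = "R" ∨ s.1 = "U" ∨ s.1 = "D") :
    ∃ steps, pvSteps? rest = some steps := by
  induction rest with
  | nil => exact ⟨[], rfl⟩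
  | cons s r ih =>
    obtain ⟨steps, hsteps⟩ := ih (fun x hx => h x (List.mem_cons_of_mem _ hx))
    have hs := h s (List.mem_cons_self ..)
    have hu : ∃ u, pvDirTable.get? s.1 = some u := by
      rcases hs with h1 | h1 | h1 | h1 <;> rw [h1] <;> exact ⟨_, rfl⟩
    obtain ⟨u, hu⟩ := hu
    have hsteps' : List.mapM (fun s => Option.map (fun u => (u.1 * s.2, u.2 * s.2)) (pvDirTable.get? s.1)) r = some steps := by
      simpa [pvSteps?] using hsteps
    exact ⟨(u.1 * s.2, u.2 * s.2) :: steps, by simp [pvSteps?, List.mapM_cons, hu, hsteps']⟩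

-- Peeling one valid move off B: the head segment goes from start_point to e.
theorem alt_cons (sp e : Int × Int) (s : String × Int) (rest : List (String × Int))
    (u : Int × Int) (steps : List (Int × Int))
    (hsteps : pvSteps? rest = some steps)
    (hu : pvDirTable.get? s.1 = some u)
    (he : e = (sp.1 + u.1 * s.2, sp.2 + u.2 * s.2)) :
    absolute_sections_alt sp (s :: rest)
      = (sp, e) :: absolute_sections_alt e rest := by
  subst he
  have hsteps' : List.mapM (fun s => Option.map (fun u => (u.1 * s.2, u.2 * s.2)) (pvDirTable.get? s.1)) rest = some steps := by
    simpa [pvSteps?] using hsteps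
  have hmap : pvSteps? (s :: rest) = some ((u.1 * s.2, u.2 * s.2) :: steps) := by
    simp [pvSteps?, List.mapM_cons, hu, hsteps']
  simp only [absolute_sections_alt, hmap, hsteps]
  simp only [List.map_cons, pvPrefix, List.length_cons, List.range_succ_eq_map, List.map_map]
  rcases steps with _ | ⟨st, sts⟩ <;> simp [pvPrefix, Function.comp, List.getD]

theorem abs_eq_alt (rel_sections : List (String × Int)) (start_point : Int × Int)
    (h : ∀ s ∈ rel_sections, s.1 = "L" ∨ s.1 = "R" ∨ s.1 = "U" ∨ s.1 = "D") :
    absolute_sections start_point rel_sections = absolute_sections_alt start_point rel_sections := by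
  induction rel_sections generalizing start_point with
  | nil => rfl
  | cons s rest ih =>
    have hs := h s (List.mem_cons_self ..)
    have hrest : ∀ x ∈ rest, x.1 = "L" ∨ x.1 = "R" ∨ x.1 = "U" ∨ x.1 = "D" :=
      fun x hx => h x (List.mem_cons_of_mem _ hx)
    obtain ⟨steps, hsteps⟩ := pre_steps rest hrest
    rcases hs with h1 | h1 | h1 | h1
    · rw [alt_cons start_point (start_point.1 - s.2, start_point.2) s rest (-1, 0) steps hsteps
        (by rw [h1]; rfl) (by simp; ring)]
      simp [absolute_sections, endPoint?, h1]
      rw [ih _ hrest]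
    · rw [alt_cons start_point (start_point.1 + s.2, start_point.2) s rest (1, 0) steps hsteps
        (by rw [h1]; rfl) (by simp)]
      simp [absolute_sections, endPoint?, h1]
      rw [ih _ hrest]
    · rw [alt_cons start_point (start_point.1, start_point.2 + s.2) s rest (0, 1) steps hsteps
        (by rw [h1]; rfl) (by simp)]
      simp [absolute_sections, endPoint?, h1]
      rw [ih _ hrest]
    · rw [alt_cons start_point (start_point.1, start_point.2 - s.2) s rest (0, -1) steps hsteps
        (by rw [h1]; rfl) (by simp; ring)]
      simp [absolute_sections, endPoint?, h1]
      rw [ih _ hrest]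

-- ===== VERDICT =====
theorem absolute_sections_spec : Claim_equal_absolute_sections := by
  intro sp rs _ hpre
  exact abs_eq_alt rs sp hpre
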